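-- pv_equiv track=rewrite | github.com/dzemidkada/log-ml-wip | src/logml/commons/readers.py | sanitize_column
-- ===== SOURCE A (Python) =====
-- UNALLOWED_CHARACTERS = ' -[]()+\'/,'
--
-- def sanitize_column(col_name, replace_dot=False):
--     """
--     Replaces unallowed characters in a given column name, casts to lower case.
--     Additional rules/flags could be added.
--     """
--     col_name = col_name.strip().lower()
--
--     for ch in UNALLOWED_CHARACTERS:
--         col_name = col_name.replace(ch, '_')
--
--     if replace_dot:
--         col_name = col_name.replace('.', '_')
--
--     col_name = col_name.replace('%', 'perc')
--
--     return col_name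
-- ===== SOURCE B (Python) =====
-- UNALLOWED_SET = set(" -[]()+'/,")
--
-- def sanitize_column(col_name, replace_dot=False):
--     """Single-pass rewrite: one traversal with a set-membership test instead of
--     ~10 sequential full-string .replace scans."""
--     col_name = col_name.strip().lower()
--     return ''.join(
--         '_' if (ch in UNALLOWED_SET or (replace_dot and ch == '.'))
--         else ('perc' if ch == '%' else ch)
--         for ch in col_name
--     )
-- ===== Notes on version B (the rewrite author's own statement) =====
-- stated objective: simpler
-- what changed: Replaces the chain of ~10 sequential full-string .replace passes with a single character-level pass that maps each char via a set-membership test ('_' for unallowed/dot, 'perc' for '%', else itself).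
import Mathlib
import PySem

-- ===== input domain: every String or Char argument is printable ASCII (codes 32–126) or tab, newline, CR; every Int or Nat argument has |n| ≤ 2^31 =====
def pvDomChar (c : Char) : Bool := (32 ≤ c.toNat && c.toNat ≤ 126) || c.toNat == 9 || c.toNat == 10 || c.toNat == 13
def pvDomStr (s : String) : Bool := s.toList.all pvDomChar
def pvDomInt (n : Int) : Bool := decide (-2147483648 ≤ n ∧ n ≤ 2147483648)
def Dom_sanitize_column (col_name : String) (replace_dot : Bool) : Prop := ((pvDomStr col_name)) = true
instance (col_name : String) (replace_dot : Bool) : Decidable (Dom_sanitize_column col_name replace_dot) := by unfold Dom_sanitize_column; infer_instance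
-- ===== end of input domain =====

-- B replaces A's chain of sequential full-string .replace passes by a single
-- character-level pass with a set-membership test (objective: simpler).

-- ===== PORT A =====
def UNALLOWED_CHARACTERS : String := " -[]()+'/,"

def sanitize_column (col_name : String) (replace_dot : Bool) : String :=
  let c1 := PySem.Str.lower (PySem.Str.strip col_name)
  let c2 := UNALLOWED_CHARACTERS.toList.foldl
    (fun s ch => PySem.Str.replace s (String.ofList [ch]) "_") c1
  let c3 := if replace_dot then PySem.Str.replace c2 "." "_" else c2
  PySem.Str.replace c3 "%" "perc"

-- ===== PORT B =====
def UNALLOWED_SET : PySem.Set Char := PySem.Set.ofList " -[]()+'/,".toList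

def sanitize_column_alt (col_name : String) (replace_dot : Bool) : String :=
  let cs := PySem.Chars.lower (PySem.Chars.strip col_name.toList)
  String.ofList (cs.flatMap (fun ch =>
    if UNALLOWED_SET.contains ch || (replace_dot && ch == '.') then ['_']
    else if ch == '%' then "perc".toList
    else [ch]))

-- ===== PRECONDITION & SPEC =====
def Spec_sanitize_column (col_name : String) (replace_dot : Bool) (out : String) : Prop := out = sanitize_column_alt col_name replace_dot
instance (col_name : String) (replace_dot : Bool) (out : String) : Decidable (Spec_sanitize_column col_name replace_dot out) := by unfold Spec_sanitize_column; infer_instance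

-- ===== CLAIM (what is proved, stated in full; the proofs are below) =====
def Claim_equal_sanitize_column : Prop := ∀ (col_name : String) (replace_dot : Bool), Dom_sanitize_column col_name replace_dot → Spec_sanitize_column col_name replace_dot (sanitize_column col_name replace_dot)

-- ===== LEMMAS AND PROOFS =====

-- single-character substitution as a per-char function
def pvSubst (c : Char) (r : List Char) (x : Char) : List Char :=
  if x = c then r else [x]

lemma replace_go_single (c : Char) (r : List Char) :
    ∀ (fuel : Nat) (l acc : List Char), l.length ≤ fuel →
      PySem.Chars.replace.go [c] r fuel l acc
        = acc.reverse ++ l.flatMap (pvSubst c r) := by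
  intro fuel
  induction fuel with
  | zero =>
      intro l acc h
      have : l = [] := List.eq_nil_of_length_eq_zero (Nat.le_zero.mp h)
      subst this
      simp [PySem.Chars.replace.go]
  | succ n ih =>
      intro l acc h
      cases l with
      | nil => simp [PySem.Chars.replace.go]
      | cons x t =>
          by_cases hx : x = c
          · subst hx
            have hpre : List.isPrefixOf [x] (x :: t) = true := by
              simp [List.isPrefixOf]
            simp only [PySem.Chars.replace.go, hpre, if_pos, List.length_cons,
              List.length_nil, List.drop_succ_cons, List.drop_zero]
            rw [ih t (r.reverse ++ acc) (by simpa using Nat.le_of_succ_le_succ h)]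
            simp [pvSubst]
          · have hpre : List.isPrefixOf [c] (x :: t) = false := by
              simp [List.isPrefixOf]
              exact fun hh => (hx hh.symm).elim
            simp only [PySem.Chars.replace.go, hpre, Bool.false_eq_true, if_false]
            rw [ih t (x :: acc) (by simpa using Nat.le_of_succ_le_succ h)]
            simp [pvSubst, hx]

lemma replace_single (c : Char) (r : List Char) (l : List Char) :
    PySem.Chars.replace l [c] r = l.flatMap (pvSubst c r) := by
  simp [PySem.Chars.replace, replace_go_single c r l.length l [] (le_refl _)]

-- a chain of single-char-to-'_' replaces is one flatMap with a membership test
lemma chain_eq (cs : List Char) (m : List Char) :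
    cs.foldl (fun l c => PySem.Chars.replace l [c] ['_']) m
      = m.flatMap (fun x => if x ∈ cs then ['_'] else [x]) := by
  induction cs generalizing m with
  | nil => simp
  | cons c cs ih =>
      rw [List.foldl_cons, replace_single, ih, List.flatMap_assoc]
      congr 1
      funext x
      by_cases hx : x = c
      · subst hx
        simp only [pvSubst, List.flatMap_cons, List.flatMap_nil,
          List.append_nil, List.mem_cons, true_or, if_pos]
        by_cases h_ : ('_' : Char) ∈ cs <;> simp [h_]
      · simp [pvSubst, hx]

-- the string-level foldl of A is the list-level foldl
lemma foldl_str (cs : List Char) (s : String) :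
    (cs.foldl (fun s ch => String.ofList (PySem.Chars.replace s.toList [ch] ['_'])) s).toList
      = cs.foldl (fun l c => PySem.Chars.replace l [c] ['_']) s.toList := by
  induction cs generalizing s with
  | nil => rfl
  | cons c cs ih =>
      rw [List.foldl_cons, List.foldl_cons, ih, String.toList_ofList]

theorem sanitize_column_spec : Claim_equal_sanitize_column := by
  intro col_name replace_dot _
  unfold Spec_sanitize_column sanitize_column sanitize_column_alt
  simp only [PySem.Str.replace, PySem.Str.lower, PySem.Str.strip, String.toList_ofList,
    show ("_" : String).toList = ['_'] from rfl]
  congr 1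
  generalize PySem.Chars.lower (PySem.Chars.strip col_name.toList) = m
  cases replace_dot with
  | false =>
      simp only [Bool.false_eq_true, if_false]
      rw [foldl_str, String.toList_ofList, chain_eq,
        show ("%" : String).toList = ['%'] from rfl, replace_single, List.flatMap_assoc,
        show UNALLOWED_CHARACTERS.toList
          = [' ', '-', '[', ']', '(', ')', '+', '\'', '/', ','] from rfl]
      congr 1
      funext x
      by_cases hx : x ∈ [' ', '-', '[', ']', '(', ')', '+', '\'', '/', ',']
      · fin_cases hx <;> rfl
      · simp only [hx, if_false, List.flatMap_cons, List.flatMap_nil, List.append_nil]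
        by_cases hp : x = '%'
        · subst hp; rfl
        · simp [pvSubst, hp, UNALLOWED_SET, PySem.Set.mem_ofList, hx]
  | true =>
      simp only [if_true]
      rw [foldl_str, String.toList_ofList, chain_eq,
        show ("." : String).toList = ['.'] from rfl, replace_single, String.toList_ofList,
        show ("%" : String).toList = ['%'] from rfl, replace_single,
        List.flatMap_assoc, List.flatMap_assoc,
        show UNALLOWED_CHARACTERS.toList
          = [' ', '-', '[', ']', '(', ')', '+', '\'', '/', ','] from rfl]
      congr 1
      funext x
      by_cases hx : x ∈ [' ', '-', '[', ']', '(', ')', '+', '\'', '/', ',']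
      · fin_cases hx <;> rfl
      · simp only [hx, if_false, List.flatMap_cons, List.flatMap_nil, List.append_nil]
        by_cases hd : x = '.'
        · subst hd; rfl
        · by_cases hp : x = '%'
          · subst hp; rfl
          · simp [pvSubst, hp, hd, UNALLOWED_SET, PySem.Set.mem_ofList, hx]
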